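-- pv_equiv track=rewrite | github.com/AndreaGold99/ALG-SARProject | test_tarea2_plantilla.py | dp_restricted_damerau_threshold
-- ===== SOURCE A (Python) =====
-- def dp_restricted_damerau_threshold(x, y, th):
--     currentrow = [0]*(1+len(x))
--     previousrow = [0]*(1+len(x))
--     previousrow2 = [0]*(1+len(x))
--     currentrow[0] = 0
--
--     for i in range(1, len(x)+1):
--         currentrow[i] = currentrow[i-1] + 1
--     for j in range(1, len(y)+1):
--         previousrow, currentrow, previousrow2 = currentrow, previousrow2, previousrow
--         currentrow[0] = previousrow[0] + 1
--         for i in range(1, len(x)+1):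
--             if i > 1 and j > 1 and x[i-2] == y[j-1] and x[i-1] == y[j-2]:
--                 aux = previousrow2[i-2] + 1
--             else:
--                 aux = 10000
--             currentrow[i] = min(currentrow[i-1] + 1,
--                 previousrow[i] + 1,
--                 previousrow[i-1]+(x[i-1] != y[j-1]),
--                 aux)
--         if min(currentrow) > th:
--             return th + 1
--     return min(currentrow[len(x)], th + 1)
-- ===== SOURCE B (Python) =====
-- def dp_restricted_damerau_threshold(x, y, th):
--     # Anti-diagonal wavefront: cells are computed along diagonals i + j = d
--     # (each cell depends only on diagonals d-1, d-2 and d-4), all diagonals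
--     # kept in one growing list; no rolling rows and no early exit, a single
--     # final min against th + 1.
--     m, n = len(x), len(y)
--
--     def get(ds, i, j):  # value of an already-computed cell (i, j)
--         return ds[i + j][i - max(0, i + j - n)]
--
--     def cell(ds, i, j):
--         if i == 0:
--             return j
--         if j == 0:
--             return i
--         if i > 1 and j > 1 and x[i - 2] == y[j - 1] and x[i - 1] == y[j - 2]:
--             t = get(ds, i - 2, j - 2) + 1
--         else:
--             t = 10000
--         return min(get(ds, i - 1, j) + 1,
--                    get(ds, i, j - 1) + 1,
--                    get(ds, i - 1, j - 1) + (x[i - 1] != y[j - 1]),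
--                    t)
--
--     ds = [[0]]
--     for d in range(1, m + n + 1):
--         ds.append([cell(ds, i, d - i)
--                    for i in range(max(0, d - n), min(m, d) + 1)])
--     return min(get(ds, m, n), th + 1)
-- ===== Notes on version B (the rewrite author's own statement) =====
-- stated objective: alternative
-- what changed: B computes the DP by anti-diagonal wavefronts (all cells with i+j=d at once), keeping every finished diagonal in one growing list and taking a single final min against th+1, instead of A's row-by-row sweep over y with three rotating row buffers and a per-row threshold early exit; this is correct because each cell depends only on diagonals d-1, d-2 and d-4, and A's early exit returns the same th+1 that the final min yields.
import Mathlib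
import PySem

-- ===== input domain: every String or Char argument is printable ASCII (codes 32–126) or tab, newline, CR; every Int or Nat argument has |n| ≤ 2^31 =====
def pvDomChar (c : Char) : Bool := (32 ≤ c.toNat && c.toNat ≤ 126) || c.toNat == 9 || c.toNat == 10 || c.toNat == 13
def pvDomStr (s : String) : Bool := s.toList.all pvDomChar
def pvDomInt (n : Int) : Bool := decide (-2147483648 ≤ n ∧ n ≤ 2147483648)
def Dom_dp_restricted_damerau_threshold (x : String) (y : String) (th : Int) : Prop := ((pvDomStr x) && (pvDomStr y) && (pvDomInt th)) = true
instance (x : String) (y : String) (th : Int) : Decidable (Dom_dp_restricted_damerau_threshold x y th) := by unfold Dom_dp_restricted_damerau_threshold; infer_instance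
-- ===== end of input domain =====

-- B traverses the DP table by anti-diagonals (all cells with i+j=d at once, every finished
-- diagonal kept, one final min against th+1) instead of A's row sweep with three rotating
-- buffers and a per-row threshold early exit: objective 'alternative'.

-- ===== PORT A =====
-- min(currentrow) for a nonempty int list (Python's min on a list of ints).
def pvMinD : List Int → Int
  | [] => 0
  | a :: t => t.foldl min a

-- one cell of A's inner loop: min(currentrow[i-1]+1, previousrow[i]+1, previousrow[i-1]+(x[i-1]!=y[j-1]), aux)
def pvCellA (xs ys : List Char) (j : Nat) (prev prev2 : List Int) (i : Nat) (left : Int) : Int :=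
  let aux : Int :=
    if 1 < i ∧ 1 < j ∧ xs.getD (i-2) ' ' = ys.getD (j-1) ' ' ∧ xs.getD (i-1) ' ' = ys.getD (j-2) ' ' then
      prev2.getD (i-2) 0 + 1
    else 10000
  min (min (left + 1) (prev.getD i 0 + 1))
      (min (prev.getD (i-1) 0 + (if xs.getD (i-1) ' ' = ys.getD (j-1) ' ' then 0 else 1)) aux)

-- A's inner loop "for i in range(1, len(x)+1): currentrow[i] = ..." (cells i..len(x))
def pvInnerA (xs ys : List Char) (j : Nat) (prev prev2 : List Int) (i : Nat) (left : Int) : List Int :=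
  if _h : i ≤ xs.length then
    let c := pvCellA xs ys j prev prev2 i left
    c :: pvInnerA xs ys j prev prev2 (i+1) c
  else []
termination_by xs.length + 1 - i
decreasing_by omega

-- A's first loop "for i in range(1, len(x)+1): currentrow[i] = currentrow[i-1] + 1"
def pvInitA (n : Nat) (i : Nat) (left : Int) : List Int :=
  if _h : i ≤ n then (left + 1) :: pvInitA n (i+1) (left + 1) else []
termination_by n + 1 - i
decreasing_by omega

-- A's outer loop over j, with the early threshold return
def pvLoopA (xs ys : List Char) (th : Int) (j : Nat) (prev2 prev : List Int) : Int :=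
  if _h : j ≤ ys.length then
    let cur := (prev.getD 0 0 + 1) :: pvInnerA xs ys j prev prev2 1 (prev.getD 0 0 + 1)
    if pvMinD cur > th then th + 1
    else pvLoopA xs ys th (j+1) prev cur
  else min (prev.getD xs.length 0) (th + 1)
termination_by ys.length + 1 - j
decreasing_by omega

def dp_restricted_damerau_threshold (x : String) (y : String) (th : Int) : Int :=
  pvLoopA x.toList y.toList th 1 (List.replicate (x.toList.length + 1) 0)
    (0 :: pvInitA x.toList.length 1 0)

-- ===== PORT B =====
-- Source B's get(ds, i, j): ds[i + j][i - max(0, i + j - n)]  (all indices in range on every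
-- call B makes, so getD reads the same element Python does)
def pvGetW (n : Nat) (ds : List (List Int)) (i j : Nat) : Int :=
  (ds.getD (i + j) []).getD (i - (i + j - n)) 0

-- Source B's cell(ds, i, j)
def pvCellW (xs ys : List Char) (ds : List (List Int)) (i j : Nat) : Int :=
  if i = 0 then (j : Int)
  else if j = 0 then (i : Int)
  else
    let t : Int :=
      if 1 < i ∧ 1 < j ∧ xs.getD (i-2) ' ' = ys.getD (j-1) ' ' ∧ xs.getD (i-1) ' ' = ys.getD (j-2) ' ' then
        pvGetW ys.length ds (i-2) (j-2) + 1
      else 10000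
    min (min (pvGetW ys.length ds (i-1) j + 1) (pvGetW ys.length ds i (j-1) + 1))
        (min (pvGetW ys.length ds (i-1) (j-1) + (if xs.getD (i-1) ' ' = ys.getD (j-1) ' ' then 0 else 1)) t)

-- one diagonal: [cell(ds, i, d - i) for i in range(max(0, d - n), min(m, d) + 1)]
def pvDiagW (xs ys : List Char) (ds : List (List Int)) (d : Nat) : List Int :=
  (List.range' (d - ys.length) (min xs.length d + 1 - (d - ys.length))).map
    (fun i => pvCellW xs ys ds i (d - i))

def dp_restricted_damerau_threshold_alt (x : String) (y : String) (th : Int) : Int :=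
  min (pvGetW y.toList.length
        ((List.range' 1 (x.toList.length + y.toList.length)).foldl
          (fun ds d => ds ++ [pvDiagW x.toList y.toList ds d]) [[0]])
        x.toList.length y.toList.length)
      (th + 1)

-- ===== PRECONDITION & SPEC =====
def Spec_dp_restricted_damerau_threshold (x : String) (y : String) (th : Int) (out : Int) : Prop := out = dp_restricted_damerau_threshold_alt x y th
instance (x : String) (y : String) (th : Int) (out : Int) : Decidable (Spec_dp_restricted_damerau_threshold x y th out) := by unfold Spec_dp_restricted_damerau_threshold; infer_instance

-- ===== CLAIM (what is proved, stated in full; the proofs are below) =====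
def Claim_equal_dp_restricted_damerau_threshold : Prop := ∀ (x : String) (y : String) (th : Int), Dom_dp_restricted_damerau_threshold x y th → Spec_dp_restricted_damerau_threshold x y th (dp_restricted_damerau_threshold x y th)

-- ===== LEMMAS AND PROOFS =====

-- The restricted Damerau–Levenshtein table both programs fill (with A's constant 10000
-- for "transposition not applicable"), as a recursive function of the cell coordinates.
def Dcell (xs ys : List Char) : Nat → Nat → Int
  | i, 0 => (i : Int)
  | 0, j+1 => ((j : Int) + 1)
  | i+1, j+1 =>
      let aux : Int :=
        if 0 < i ∧ 0 < j ∧ xs.getD (i-1) ' ' = ys.getD j ' ' ∧ xs.getD i ' ' = ys.getD (j-1) ' ' then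
          Dcell xs ys (i-1) (j-1) + 1
        else 10000
      min (min (Dcell xs ys i (j+1) + 1) (Dcell xs ys (i+1) j + 1))
          (min (Dcell xs ys i j + (if xs.getD i ' ' = ys.getD j ' ' then 0 else 1)) aux)
termination_by i j => i + j
decreasing_by all_goals omega

-- - foldl-min toolbox -
theorem pv_foldl_min_le_init (l : List Int) (a : Int) : l.foldl min a ≤ a := by
  induction l generalizing a with
  | nil => simp
  | cons b t ih => simpa using le_trans (ih (min a b)) (by omega)

theorem pv_foldl_min_le_mem (l : List Int) (a b : Int) (hb : b ∈ l) : l.foldl min a ≤ b := by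
  induction l generalizing a with
  | nil => cases hb
  | cons c t ih =>
    rcases List.mem_cons.1 hb with rfl | h
    · exact le_trans (pv_foldl_min_le_init t (min a b)) (by omega)
    · simpa using ih (min a c) h

theorem pv_le_foldl_min (l : List Int) (a c : Int) (ha : c ≤ a) (h : ∀ b ∈ l, c ≤ b) :
    c ≤ l.foldl min a := by
  induction l generalizing a with
  | nil => simpa using ha
  | cons b t ih =>
    simp only [List.foldl_cons]
    exact ih (min a b) (le_min ha (h b (by simp))) (fun d hd => h d (by simp [hd]))

-- - Dcell basics -
theorem Dcell_zero_left (xs ys : List Char) (j : Nat) : Dcell xs ys 0 j = (j : Int) := by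
  cases j <;> simp [Dcell]

theorem Dcell_zero_right (xs ys : List Char) (i : Nat) : Dcell xs ys i 0 = (i : Int) := by
  cases i <;> simp [Dcell]

theorem Dcell_le_up (xs ys : List Char) (i j : Nat) :
    Dcell xs ys i (j+1) ≤ Dcell xs ys i j + 1 := by
  cases i with
  | zero => simp [Dcell_zero_left]
  | succ i =>
    rw [Dcell]
    refine le_trans (min_le_left _ _) (le_trans (min_le_right _ _) ?_)
    omega

theorem Dcell_one_le (xs ys : List Char) (j : Nat) : Dcell xs ys 1 j ≤ 10000 := by
  cases j with
  | zero => simp [Dcell_zero_right]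
  | succ j =>
    show Dcell xs ys (0+1) (j+1) ≤ 10000
    rw [Dcell]
    refine le_trans (min_le_right _ _) (le_trans (min_le_right _ _) ?_)
    simp

-- - row minima of the Dcell table -
def pvRowL (xs ys : List Char) (j : Nat) : List Int :=
  (List.range' 0 (xs.length + 1)).map (fun i => Dcell xs ys i j)

def pvM (xs ys : List Char) (j : Nat) : Int := pvMinD (pvRowL xs ys j)

theorem pvMinD_le_mem (l : List Int) (b : Int) (hb : b ∈ l) : pvMinD l ≤ b := by
  cases l with
  | nil => cases hb
  | cons a t =>
    rcases List.mem_cons.1 hb with rfl | h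
    · exact pv_foldl_min_le_init t b
    · exact pv_foldl_min_le_mem t a b h

theorem pv_le_pvMinD (l : List Int) (c : Int) (hl : l ≠ []) (h : ∀ b ∈ l, c ≤ b) :
    c ≤ pvMinD l := by
  cases l with
  | nil => exact absurd rfl hl
  | cons a t => exact pv_le_foldl_min t a c (h a (by simp)) (fun b hb => h b (by simp [hb]))

theorem pvMinD_mem (l : List Int) (hl : l ≠ []) : pvMinD l ∈ l := by
  cases l with
  | nil => exact absurd rfl hl
  | cons a t =>
    show t.foldl min a ∈ a :: t
    clear hl
    induction t generalizing a with
    | nil => simp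
    | cons b t ih =>
      simp only [List.foldl_cons]
      rcases List.mem_cons.1 (ih (min a b)) with h | h
      · rw [h]
        rcases le_total a b with hab | hab
        · simp [min_eq_left hab]
        · simp [min_eq_right hab]
      · simp [h]

theorem pvM_le (xs ys : List Char) (j i : Nat) (h : i ≤ xs.length) :
    pvM xs ys j ≤ Dcell xs ys i j := by
  apply pvMinD_le_mem
  exact List.mem_map.2 ⟨i, by simp [List.mem_range']; omega, rfl⟩

theorem pvM_ge (xs ys : List Char) (j : Nat) (c : Int)
    (h : ∀ i ≤ xs.length, c ≤ Dcell xs ys i j) : c ≤ pvM xs ys j := by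
  apply pv_le_pvMinD _ _ (by simp [pvRowL])
  intro b hb
  rcases List.mem_map.1 hb with ⟨i, hi, rfl⟩
  exact h i (by simp [List.mem_range'] at hi; omega)

theorem pvM_succ_le (xs ys : List Char) (j : Nat) :
    pvM xs ys (j+1) ≤ pvM xs ys j + 1 := by
  have hmem := pvMinD_mem (pvRowL xs ys j) (by simp [pvRowL])
  rcases List.mem_map.1 hmem with ⟨i, hi, hv⟩
  have hin : i ≤ xs.length := by simp [List.mem_range'] at hi; omega
  have h1 : pvM xs ys (j+1) ≤ Dcell xs ys i (j+1) := pvM_le xs ys (j+1) i hin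
  have h2 : Dcell xs ys i (j+1) ≤ Dcell xs ys i j + 1 := Dcell_le_up xs ys i j
  have h3 : Dcell xs ys i j = pvM xs ys j := hv
  omega

theorem pv_cell_ge (xs ys : List Char) (j : Nat) (hj : 1 ≤ j) :
    ∀ i, i ≤ xs.length →
      min (pvM xs ys j) (pvM xs ys (j-1) + 1) ≤ Dcell xs ys i (j+1) := by
  intro i
  induction i with
  | zero =>
    intro _
    have h0 : pvM xs ys j ≤ Dcell xs ys 0 j := pvM_le xs ys j 0 (by omega)
    rw [Dcell_zero_left] at h0
    rw [Dcell_zero_left]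
    push_cast
    omega
  | succ i ih =>
    intro hin
    have hi : i ≤ xs.length := by omega
    have h1 := ih hi
    have h2 : pvM xs ys j ≤ Dcell xs ys (i+1) j := pvM_le xs ys j (i+1) hin
    have h3 : pvM xs ys j ≤ Dcell xs ys i j := pvM_le xs ys j i hi
    have h4 : pvM xs ys j ≤ Dcell xs ys 1 j := pvM_le xs ys j 1 (by omega)
    have h5 : Dcell xs ys 1 j ≤ 10000 := Dcell_one_le xs ys j
    obtain ⟨j', rfl⟩ : ∃ j', j = j' + 1 := ⟨j - 1, by omega⟩
    rw [Dcell]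
    simp only [Nat.add_sub_cancel] at h1 ⊢
    have hcost : (0:Int) ≤ (if xs.getD i ' ' = ys.getD (j'+1) ' ' then 0 else 1) := by
      split <;> norm_num
    by_cases hcnd : 0 < i ∧ 0 < j' + 1 ∧ xs.getD (i-1) ' ' = ys.getD (j'+1) ' ' ∧
        xs.getD i ' ' = ys.getD j' ' ' 
    · have h6 : pvM xs ys j' ≤ Dcell xs ys (i-1) j' := pvM_le xs ys j' (i-1) (by omega)
      rw [if_pos hcnd]
      omega
    · rw [if_neg hcnd]
      omega

theorem pvM_mono_succ (xs ys : List Char) (j : Nat) (hj : 1 ≤ j) :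
    pvM xs ys j ≤ pvM xs ys (j+1) := by
  have h1 : min (pvM xs ys j) (pvM xs ys (j-1) + 1) ≤ pvM xs ys (j+1) :=
    pvM_ge xs ys (j+1) _ (fun i hi => pv_cell_ge xs ys j hj i hi)
  have h2 : pvM xs ys j ≤ pvM xs ys (j-1) + 1 := by
    have := pvM_succ_le xs ys (j-1)
    have hjj : j - 1 + 1 = j := by omega
    rw [hjj] at this
    exact this
  omega

theorem pvM_mono (xs ys : List Char) (a b : Nat) (ha : 1 ≤ a) (hab : a ≤ b) :
    pvM xs ys a ≤ pvM xs ys b := by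
  induction b with
  | zero => omega
  | succ b ih =>
    rcases Nat.lt_or_ge a (b+1) with h | h
    · exact le_trans (ih (by omega)) (pvM_mono_succ xs ys b (by omega))
    · have : a = b + 1 := by omega
      subst this
      rfl

-- - port A computes the Dcell rows -
def pvRowOK (xs ys : List Char) (j : Nat) (r : List Int) : Prop :=
  ∀ i, i ≤ xs.length → r.getD i 0 = Dcell xs ys i j

theorem pv_getD_map_range' (f : Nat → Int) (len i : Nat) (h : i < len) :
    ((List.range' 0 len).map f).getD i 0 = f i := by
  have hl : i < ((List.range' 0 len).map f).length := by simpa using h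
  rw [List.getD_eq_getElem _ _ hl]
  simp

theorem pv_range'_zero_succ (len : Nat) : List.range' 0 (len+1) = 0 :: List.range' 1 len := by
  rw [List.range'_succ]

theorem pv_cellA_eq (xs ys : List Char) (prev prev2 : List Int) (i j : Nat)
    (hi1 : 1 ≤ i) (hin : i ≤ xs.length) (hj : 1 ≤ j)
    (hp : pvRowOK xs ys (j-1) prev) (hp2 : 2 ≤ j → pvRowOK xs ys (j-2) prev2) :
    pvCellA xs ys j prev prev2 i (Dcell xs ys (i-1) j) = Dcell xs ys i j := by
  obtain ⟨i, rfl⟩ : ∃ i', i = i' + 1 := ⟨i - 1, by omega⟩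
  obtain ⟨j, rfl⟩ : ∃ j', j = j' + 1 := ⟨j - 1, by omega⟩
  simp only [Nat.add_sub_cancel] at hp ⊢
  have e2 : i + 1 - 2 = i - 1 := by omega
  have e2' : j + 1 - 2 = j - 1 := by omega
  unfold pvCellA
  rw [Dcell]
  simp only [Nat.add_sub_cancel, e2, e2'] at hp2 ⊢
  have hcnd : (1 < i + 1 ∧ 1 < j + 1 ∧ xs.getD (i-1) ' ' = ys.getD j ' ' ∧
        xs.getD i ' ' = ys.getD (j-1) ' ')
      = (0 < i ∧ 0 < j ∧ xs.getD (i-1) ' ' = ys.getD j ' ' ∧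
        xs.getD i ' ' = ys.getD (j-1) ' ') := by
    apply propext
    constructor <;> (rintro ⟨h1, h2, h3, h4⟩; exact ⟨by omega, by omega, h3, h4⟩)
  simp only [hcnd]
  rw [hp (i+1) hin, hp i (by omega)]
  by_cases h : 0 < i ∧ 0 < j ∧ xs.getD (i-1) ' ' = ys.getD j ' ' ∧
      xs.getD i ' ' = ys.getD (j-1) ' '
  · rw [if_pos h, if_pos h, (hp2 (by omega)) (i-1) (by omega)]
  · rw [if_neg h, if_neg h]

theorem pv_innerA_eq (xs ys : List Char) (prev prev2 : List Int) (j : Nat) (hj : 1 ≤ j)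
    (hp : pvRowOK xs ys (j-1) prev) (hp2 : 2 ≤ j → pvRowOK xs ys (j-2) prev2) :
    ∀ f i, f = xs.length + 1 - i → 1 ≤ i →
      pvInnerA xs ys j prev prev2 i (Dcell xs ys (i-1) j)
        = (List.range' i f).map (fun k => Dcell xs ys k j) := by
  intro f
  induction f with
  | zero =>
    intro i hf hi
    rw [pvInnerA, dif_neg (by omega)]
    simp
  | succ f ih =>
    intro i hf hi
    rw [pvInnerA, dif_pos (by omega : i ≤ xs.length)]
    show pvCellA xs ys j prev prev2 i (Dcell xs ys (i-1) j)
        :: pvInnerA xs ys j prev prev2 (i+1) (pvCellA xs ys j prev prev2 i (Dcell xs ys (i-1) j))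
      = (List.range' i (f+1)).map (fun k => Dcell xs ys k j)
    rw [List.range'_succ, List.map_cons]
    rw [pv_cellA_eq xs ys prev prev2 i j hi (by omega) hj hp hp2]
    congr 1
    have h1 : Dcell xs ys i j = Dcell xs ys ((i+1)-1) j := by norm_num
    rw [h1, ih (i+1) (by omega) (by omega)]

theorem pv_initA_eq (n : Nat) :
    ∀ f i, f = n + 1 - i → 1 ≤ i →
      pvInitA n i ((i:Int) - 1) = (List.range' i f).map (fun k : Nat => (k : Int)) := by
  intro f
  induction f with
  | zero =>
    intro i hf hi
    rw [pvInitA, dif_neg (by omega)]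
    simp
  | succ f ih =>
    intro i hf hi
    rw [pvInitA, dif_pos (by omega : i ≤ n)]
    show ((i:Int) - 1 + 1) :: pvInitA n (i+1) ((i:Int) - 1 + 1)
      = (List.range' i (f+1)).map (fun k : Nat => (k : Int))
    rw [List.range'_succ, List.map_cons]
    have h1 : (i:Int) - 1 + 1 = (i:Int) := by ring
    rw [h1]
    congr 1
    have h2 : (i:Int) = ((i+1 : Nat) : Int) - 1 := by push_cast; ring
    rw [h2, ih (i+1) (by omega) (by omega)]

theorem pv_row0A_ok (xs ys : List Char) :
    pvRowOK xs ys 0 (0 :: pvInitA xs.length 1 0) := by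
  intro i hi
  have hini : pvInitA xs.length 1 0 = (List.range' 1 xs.length).map (fun k : Nat => (k : Int)) := by
    have h := pv_initA_eq xs.length (xs.length + 1 - 1) 1 rfl (by omega)
    norm_num at h
    exact h
  rw [hini]
  have h2 : (0:Int) :: (List.range' 1 xs.length).map (fun k : Nat => (k : Int))
      = (List.range' 0 (xs.length + 1)).map (fun k : Nat => (k : Int)) := by
    rw [pv_range'_zero_succ]
    simp
  rw [h2, pv_getD_map_range' _ _ _ (by omega), Dcell_zero_right]

theorem pv_loopA_eq (xs ys : List Char) (th : Int) :
    ∀ f j prev2 prev, f = ys.length + 1 - j → 1 ≤ j → j ≤ ys.length + 1 →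
      pvRowOK xs ys (j-1) prev → (2 ≤ j → pvRowOK xs ys (j-2) prev2) →
      pvLoopA xs ys th j prev2 prev = min (Dcell xs ys xs.length ys.length) (th + 1) := by
  intro f
  induction f with
  | zero =>
    intro j prev2 prev hf hj1 hj2 hp hp2
    have hj : j = ys.length + 1 := by omega
    rw [pvLoopA, dif_neg (by omega)]
    rw [hp xs.length (le_refl _), hj]
    simp
  | succ f ih =>
    intro j prev2 prev hf hj1 hj2 hp hp2
    rw [pvLoopA, dif_pos (by omega : j ≤ ys.length)]
    obtain ⟨j', rfl⟩ : ∃ j', j = j' + 1 := ⟨j - 1, by omega⟩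
    show (if pvMinD ((prev.getD 0 0 + 1) :: pvInnerA xs ys (j'+1) prev prev2 1 (prev.getD 0 0 + 1)) > th
          then th + 1
          else pvLoopA xs ys th (j'+1+1) prev
            ((prev.getD 0 0 + 1) :: pvInnerA xs ys (j'+1) prev prev2 1 (prev.getD 0 0 + 1)))
        = min (Dcell xs ys xs.length ys.length) (th + 1)
    have hhead : prev.getD 0 0 + 1 = Dcell xs ys 0 (j'+1) := by
      rw [hp 0 (by omega)]
      simp only [Nat.add_sub_cancel]
      rw [Dcell_zero_left, Dcell_zero_left]
      push_cast
      ring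
    have hhead0 : Dcell xs ys 0 (j'+1) = Dcell xs ys (1-1) (j'+1) := by norm_num
    have hrow : (prev.getD 0 0 + 1) :: pvInnerA xs ys (j'+1) prev prev2 1 (prev.getD 0 0 + 1)
        = (List.range' 0 (xs.length + 1)).map (fun k => Dcell xs ys k (j'+1)) := by
      rw [hhead]
      conv_lhs => rw [hhead0]
      rw [pv_innerA_eq xs ys prev prev2 (j'+1) (by omega) hp hp2 (xs.length + 1 - 1) 1 rfl (by omega)]
      rw [pv_range'_zero_succ, List.map_cons]
      simp
    rw [hrow]
    have hmin : pvMinD ((List.range' 0 (xs.length + 1)).map (fun k => Dcell xs ys k (j'+1)))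
        = pvM xs ys (j'+1) := rfl
    rw [hmin]
    by_cases hcut : pvM xs ys (j'+1) > th
    · rw [if_pos hcut]
      have h1 : pvM xs ys (j'+1) ≤ pvM xs ys ys.length :=
        pvM_mono xs ys (j'+1) ys.length (by omega) (by omega)
      have h2 : pvM xs ys ys.length ≤ Dcell xs ys xs.length ys.length :=
        pvM_le xs ys ys.length xs.length (le_refl _)
      omega
    · rw [if_neg hcut]
      apply ih (j'+2) prev _ (by omega) (by omega) (by omega)
      · intro i hi
        have e : j' + 1 + 1 - 1 = j' + 1 := by omega
        simp only [e]
        exact pv_getD_map_range' _ _ _ (by omega)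
      · intro _ i hi
        have : j' + 2 - 2 = j' + 1 - 1 := by omega
        rw [this]
        exact hp i hi

theorem pv_portA_eq (x y : String) (th : Int) :
    dp_restricted_damerau_threshold x y th
      = min (Dcell x.toList y.toList x.toList.length y.toList.length) (th + 1) := by
  unfold dp_restricted_damerau_threshold
  apply pv_loopA_eq x.toList y.toList th (y.toList.length + 1 - 1) 1 _ _ rfl (by omega) (by omega)
  · exact pv_row0A_ok x.toList y.toList
  · omega

-- - port B: the diagonal list holds the Dcell anti-diagonals -
theorem pv_getD_map_range2 (f : Nat → Int) (lo len k : Nat) (h : k < len) :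
    ((List.range' lo len).map f).getD k 0 = f (lo + k) := by
  have hl : k < ((List.range' lo len).map f).length := by simpa using h
  rw [List.getD_eq_getElem _ _ hl]
  simp

theorem pv_getD_append_left {α : Type} (l : List α) (a : α) (d : α) (k : Nat)
    (h : k < l.length) : (l ++ [a]).getD k d = l.getD k d := by
  rw [List.getD_eq_getElem _ _ (by simp; omega), List.getD_eq_getElem _ _ h]
  exact List.getElem_append_left h

theorem pv_getD_append_last {α : Type} (l : List α) (a : α) (d : α) :
    (l ++ [a]).getD l.length d = a := by
  rw [List.getD_eq_getElem _ _ (by simp)]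
  simp

-- the d-th anti-diagonal of the Dcell table, as Source B lays it out
def pvDRow (xs ys : List Char) (d : Nat) : List Int :=
  (List.range' (d - ys.length) (min xs.length d + 1 - (d - ys.length))).map
    (fun i => Dcell xs ys i (d - i))

def pvGoodW (xs ys : List Char) (d : Nat) (ds : List (List Int)) : Prop :=
  ds.length = d + 1 ∧ ∀ d', d' ≤ d → ds.getD d' [] = pvDRow xs ys d'

theorem pv_getW_eq (xs ys : List Char) (ds : List (List Int)) (i j : Nat)
    (hi : i ≤ xs.length) (hj : j ≤ ys.length)
    (hds : ds.getD (i + j) [] = pvDRow xs ys (i + j)) :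
    pvGetW ys.length ds i j = Dcell xs ys i j := by
  unfold pvGetW
  rw [hds]
  unfold pvDRow
  have hlo : i + j - ys.length ≤ i := by omega
  have hidx : i - (i + j - ys.length) < min xs.length (i + j) + 1 - (i + j - ys.length) := by
    have : i ≤ min xs.length (i + j) := by omega
    omega
  rw [pv_getD_map_range2 _ _ _ _ hidx]
  have e1 : i + j - ys.length + (i - (i + j - ys.length)) = i := by omega
  rw [e1]
  have e2 : i + j - i = j := by omega
  rw [e2]

theorem pv_cellW_eq (xs ys : List Char) (ds : List (List Int)) (i j : Nat)
    (hi : i ≤ xs.length) (hj : j ≤ ys.length)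
    (hds : ∀ d', d' < i + j → ds.getD d' [] = pvDRow xs ys d') :
    pvCellW xs ys ds i j = Dcell xs ys i j := by
  rcases Nat.eq_zero_or_pos i with rfl | hi0
  · rw [pvCellW, if_pos rfl, Dcell_zero_left]
  rcases Nat.eq_zero_or_pos j with rfl | hj0
  · rw [pvCellW, if_neg (by omega), if_pos rfl, Dcell_zero_right]
  obtain ⟨i, rfl⟩ : ∃ i', i = i' + 1 := ⟨i - 1, by omega⟩
  obtain ⟨j, rfl⟩ : ∃ j', j = j' + 1 := ⟨j - 1, by omega⟩
  rw [pvCellW, if_neg (by omega), if_neg (by omega)]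
  rw [Dcell]
  have g1 : pvGetW ys.length ds (i+1-1) (j+1) = Dcell xs ys i (j+1) := by
    have e : i + 1 - 1 = i := by omega
    rw [e]
    exact pv_getW_eq xs ys ds i (j+1) (by omega) hj (hds _ (by omega))
  have g2 : pvGetW ys.length ds (i+1) (j+1-1) = Dcell xs ys (i+1) j := by
    have e : j + 1 - 1 = j := by omega
    rw [e]
    exact pv_getW_eq xs ys ds (i+1) j hi (by omega) (hds _ (by omega))
  have g3 : pvGetW ys.length ds (i+1-1) (j+1-1) = Dcell xs ys i j := by
    have e : i + 1 - 1 = i := by omega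
    have e' : j + 1 - 1 = j := by omega
    rw [e, e']
    exact pv_getW_eq xs ys ds i j (by omega) (by omega) (hds _ (by omega))
  have e2 : i + 1 - 2 = i - 1 := by omega
  have e2' : j + 1 - 2 = j - 1 := by omega
  have e1 : i + 1 - 1 = i := by omega
  have e1' : j + 1 - 1 = j := by omega
  simp only [e1, e1'] at g1 g2 g3 ⊢
  simp only [e2, e2', g1, g2, g3]
  have hcnd : (1 < i + 1 ∧ 1 < j + 1 ∧ xs.getD (i-1) ' ' = ys.getD j ' ' ∧
        xs.getD i ' ' = ys.getD (j-1) ' ')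
      = (0 < i ∧ 0 < j ∧ xs.getD (i-1) ' ' = ys.getD j ' ' ∧
        xs.getD i ' ' = ys.getD (j-1) ' ') := by
    apply propext
    constructor <;> (rintro ⟨h1, h2, h3, h4⟩; exact ⟨by omega, by omega, h3, h4⟩)
  simp only [hcnd]
  by_cases h : 0 < i ∧ 0 < j ∧ xs.getD (i-1) ' ' = ys.getD j ' ' ∧
      xs.getD i ' ' = ys.getD (j-1) ' '
  · rw [if_pos h, if_pos h]
    have g4 : pvGetW ys.length ds (i-1) (j-1) = Dcell xs ys (i-1) (j-1) :=
      pv_getW_eq xs ys ds (i-1) (j-1) (by omega) (by omega) (hds _ (by omega))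
    rw [g4]
  · rw [if_neg h, if_neg h]

theorem pv_diagW_eq (xs ys : List Char) (ds : List (List Int)) (d : Nat)
    (hd : d ≤ xs.length + ys.length)
    (hds : ∀ d', d' < d → ds.getD d' [] = pvDRow xs ys d') :
    pvDiagW xs ys ds d = pvDRow xs ys d := by
  unfold pvDiagW pvDRow
  apply List.map_congr_left
  intro i hi
  have hmem := List.mem_range'.1 hi
  obtain ⟨k, hk1, hk2⟩ := hmem
  have hi1 : d - ys.length ≤ i := by omega
  have hi2 : i ≤ min xs.length d := by omega
  have hij : i + (d - i) = d := by omega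
  have hjn : d - i ≤ ys.length := by omega
  apply pv_cellW_eq xs ys ds i (d - i) (by omega) hjn
  intro d' hd'
  exact hds d' (by omega)

theorem pv_goodW_step (xs ys : List Char) (ds : List (List Int)) (d : Nat)
    (hd : d + 1 ≤ xs.length + ys.length) (hg : pvGoodW xs ys d ds) :
    pvGoodW xs ys (d+1) (ds ++ [pvDiagW xs ys ds (d+1)]) := by
  obtain ⟨hlen, hall⟩ := hg
  constructor
  · simp [hlen]
  · intro d' hd'
    rcases Nat.lt_or_ge d' (d+1) with h | h
    · rw [pv_getD_append_left _ _ _ _ (by omega)]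
      exact hall d' (by omega)
    · have : d' = d + 1 := by omega
      subst this
      have e : d + 1 = ds.length := by omega
      rw [e, pv_getD_append_last, ← e]
      exact pv_diagW_eq xs ys ds (d+1) hd (fun d'' h'' => hall d'' (by omega))

theorem pv_loopW_good (xs ys : List Char) :
    ∀ k, k ≤ xs.length + ys.length →
      pvGoodW xs ys k ((List.range' 1 k).foldl
        (fun ds d => ds ++ [pvDiagW xs ys ds d]) [[0]]) := by
  intro k
  induction k with
  | zero =>
    intro _
    constructor
    · rfl
    · intro d' hd'
      have : d' = 0 := by omega
      subst this
      simp [pvDRow, Dcell_zero_right]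
  | succ k ih =>
    intro hk
    have hr : List.range' 1 (k+1) = List.range' 1 k ++ [1 + 1 * k] := List.range'_concat
    rw [hr, List.foldl_append]
    simp only [List.foldl_cons, List.foldl_nil]
    have e : 1 + 1 * k = k + 1 := by omega
    rw [e]
    exact pv_goodW_step xs ys _ k hk (ih (by omega))

theorem pv_portB_eq (x y : String) (th : Int) :
    dp_restricted_damerau_threshold_alt x y th
      = min (Dcell x.toList y.toList x.toList.length y.toList.length) (th + 1) := by
  unfold dp_restricted_damerau_threshold_alt
  obtain ⟨hlen, hall⟩ := pv_loopW_good x.toList y.toList (x.toList.length + y.toList.length) (le_refl _)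
  rw [pv_getW_eq x.toList y.toList _ x.toList.length y.toList.length (le_refl _) (le_refl _)
    (hall _ (le_refl _))]

-- ===== VERDICT =====
theorem dp_restricted_damerau_threshold_spec : Claim_equal_dp_restricted_damerau_threshold := by
  intro x y th _
  unfold Spec_dp_restricted_damerau_threshold
  rw [pv_portA_eq, pv_portB_eq]
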